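-- pv_equiv track=rewrite | github.com/aaronlee232/leetcode | number-of-operations-to-make-network-connected/number-of-operations-to-make-network-connected.py | makeConnected
-- ===== SOURCE A (Python) =====
-- from typing import List
--
-- class UnionFind:
--     def __init__(self):
--         self.f = {}
--
--     def find(self, x):
--         parent = self.f.get(x, x)
--         if parent == x:
--             return x
--         else:
--             self.f[x] = self.find(parent)
--             return self.f[x]
--
--     def union(self, x, y):
--         parentX = self.find(x)
--         parentY = self.find(y)
--
--         self.f[parentX] = parentY
--
-- def makeConnected(n: int, connections: List[List[int]]) -> int:
--     uf = UnionFind()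
--     for connection in connections:
--         uf.union(connection[0], connection[1])
--
--     groups = set()
--     for i in range(n):
--         groups.add(uf.find(i))
--
--
--     if n - 1 <= len(connections):
--         return len(groups) - 1
--     else:
--         return -1
-- ===== SOURCE B (Python) =====
-- def makeConnected(n, connections):
--     # quick-find: flat label map node -> class representative; processing an
--     # edge relabels one whole class in a single scan (no recursion, no parent chains)
--     label = {}
--     for c in connections:
--         a, b = c[0], c[1]
--         la = label.get(a, a)
--         lb = label.get(b, b)
--         if la != lb:
--             for k, v in list(label.items()):
--                 if v == la:
--                     label[k] = lb
--             label[la] = lb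
--             label[b] = lb
--     if n - 1 <= len(connections):
--         return len({label.get(i, i) for i in range(n)}) - 1
--     return -1
-- ===== Notes on version B (the rewrite author's own statement) =====
-- stated objective: alternative
-- what changed: A's recursive union-find with parent chains and path compression is replaced by a flat quick-find label map (each node maps directly to its class representative; merging an edge relabels one whole class in a single scan), removing all recursion and tree structure; the edge-count guard and component counting over range(n) are kept exactly.
import Mathlib
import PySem

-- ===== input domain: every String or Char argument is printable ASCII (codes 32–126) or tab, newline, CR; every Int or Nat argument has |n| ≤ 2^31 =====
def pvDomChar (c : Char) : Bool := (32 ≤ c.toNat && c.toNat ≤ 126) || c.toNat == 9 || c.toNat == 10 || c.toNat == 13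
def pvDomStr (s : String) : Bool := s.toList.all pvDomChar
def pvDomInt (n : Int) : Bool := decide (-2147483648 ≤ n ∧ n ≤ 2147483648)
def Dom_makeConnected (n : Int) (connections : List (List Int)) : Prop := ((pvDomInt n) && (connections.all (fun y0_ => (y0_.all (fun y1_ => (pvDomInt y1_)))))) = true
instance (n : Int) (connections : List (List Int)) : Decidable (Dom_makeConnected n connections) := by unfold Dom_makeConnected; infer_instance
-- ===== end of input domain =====

-- B replaces A's recursive union-find (parent chains + path compression) by a flat
-- quick-find label map: merge relabels one whole class per edge; no recursion.

-- ===== PORT A =====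
-- UnionFind.find with fuel making the recursion structural (fuel = 0 is never
-- reached on an acyclic parent map given enough fuel; the run uses 2*|E|+2).
def pvFindA : Nat → PySem.Dict Int Int → Int → Int × PySem.Dict Int Int
  | 0, f, x => (x, f)
  | fuel+1, f, x =>
    let parent := f.getD x x
    if parent = x then (x, f)
    else
      let r := pvFindA fuel f parent
      (r.1, r.2.insert x r.1)

def pvUnionA (fuel : Nat) (f : PySem.Dict Int Int) (x y : Int) : PySem.Dict Int Int :=
  let rx := pvFindA fuel f x
  let ry := pvFindA fuel rx.2 y
  ry.2.insert rx.1 ry.1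

def pvStepA (fuel : Nat) (f : PySem.Dict Int Int) (c : List Int) : PySem.Dict Int Int :=
  pvUnionA fuel f (PySem.List.pyGetD c 0 0) (PySem.List.pyGetD c 1 0)

def pvStepCountA (fuel : Nat) (st : PySem.Dict Int Int × PySem.Set Int) (i : Int) :
    PySem.Dict Int Int × PySem.Set Int :=
  let r := pvFindA fuel st.1 i
  (r.2, PySem.Set.add st.2 r.1)

def makeConnected (n : Int) (connections : List (List Int)) : Int :=
  let fuel := 2 * connections.length + 2
  let f := connections.foldl (pvStepA fuel) PySem.Dict.empty
  let st := (PySem.List.pyRange 0 n 1).foldl (pvStepCountA fuel) (f, PySem.Set.empty)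
  if n - 1 ≤ (connections.length : Int) then (st.2.length : Int) - 1 else -1

-- ===== PORT B =====
def pvMergeB (label : PySem.Dict Int Int) (a b : Int) : PySem.Dict Int Int :=
  let la := label.getD a a
  let lb := label.getD b b
  if la = lb then label
  else
    let d := label.items.foldl (fun d kv => if kv.2 = la then d.insert kv.1 lb else d) label
    (d.insert la lb).insert b lb

def pvStepB (label : PySem.Dict Int Int) (c : List Int) : PySem.Dict Int Int :=
  pvMergeB label (PySem.List.pyGetD c 0 0) (PySem.List.pyGetD c 1 0)

def makeConnected_alt (n : Int) (connections : List (List Int)) : Int :=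
  let label := connections.foldl pvStepB PySem.Dict.empty
  let groups := (PySem.List.pyRange 0 n 1).foldl
      (fun (g : PySem.Set Int) i => PySem.Set.add g (label.getD i i)) PySem.Set.empty
  if n - 1 ≤ (connections.length : Int) then (groups.length : Int) - 1 else -1

-- ===== PRECONDITION & SPEC =====
-- Pre_ excludes only connections with fewer than two entries, on which Python A
-- raises IndexError at connection[1] (and B likewise).
def Pre_makeConnected (n : Int) (connections : List (List Int)) : Prop :=
  ∀ c ∈ connections, 2 ≤ c.length
instance (n : Int) (connections : List (List Int)) : Decidable (Pre_makeConnected n connections) := by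
  unfold Pre_makeConnected; infer_instance

def pvWitness_makeConnected : Int × List (List Int) := (2, [[0, 1]])

def Spec_makeConnected (n : Int) (connections : List (List Int)) (out : Int) : Prop := out = makeConnected_alt n connections
instance (n : Int) (connections : List (List Int)) (out : Int) : Decidable (Spec_makeConnected n connections out) := by unfold Spec_makeConnected; infer_instance

-- ===== CLAIM (what is proved, stated in full; the proofs are below) =====
def Claim_equal_makeConnected : Prop := ∀ (n : Int) (connections : List (List Int)), Dom_makeConnected n connections → Pre_makeConnected n connections → Spec_makeConnected n connections (makeConnected n connections)

-- ===== LEMMAS AND PROOFS =====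

-- Root walk in A's parent map: follow parents for at most k steps.
def rootW : Nat → PySem.Dict Int Int → Int → Option Int
  | 0, _, _ => none
  | k+1, f, x => if f.getD x x = x then some x else rootW k f (f.getD x x)

-- every node reaches its root within k steps
def Good (f : PySem.Dict Int Int) (k : Nat) : Prop := ∀ x, ∃ r, rootW k f x = some r

-- d preserves every settled root walk of f
def Pres (f d : PySem.Dict Int Int) : Prop :=
  ∀ (k : Nat) (z s : Int), rootW k f z = some s → rootW k d z = some s

theorem rootW_succ {f : PySem.Dict Int Int} {k : Nat} {x r : Int}
    (h : rootW k f x = some r) : rootW (k+1) f x = some r := by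
  induction k generalizing x with
  | zero => simp [rootW] at h
  | succ k ih =>
    by_cases hc : f.getD x x = x
    · simpa [rootW, hc] using h
    · rw [rootW] at h
      rw [show k + 1 + 1 = (k + 1) + 1 from rfl, rootW]
      simp only [hc, if_false] at h ⊢
      exact ih h

theorem rootW_mono {f : PySem.Dict Int Int} {k k' : Nat} {x r : Int}
    (hk : k ≤ k') (h : rootW k f x = some r) : rootW k' f x = some r := by
  induction k' with
  | zero =>
    have : k = 0 := by omega
    subst this; exact h
  | succ k' ih =>
    rcases Nat.lt_or_ge k (k'+1) with hlt | hge
    · exact rootW_succ (ih (by omega))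
    · have : k = k' + 1 := by omega
      subst this; exact h

theorem rootW_fix {f : PySem.Dict Int Int} {k : Nat} {x r : Int}
    (h : rootW k f x = some r) : f.getD r r = r := by
  induction k generalizing x with
  | zero => simp [rootW] at h
  | succ k ih =>
    by_cases hc : f.getD x x = x
    · simp [rootW, hc] at h; subst h; exact hc
    · rw [rootW] at h; simp only [hc, if_false] at h; exact ih h

theorem rootW_uniq {f : PySem.Dict Int Int} {k m : Nat} {x r s : Int}
    (h1 : rootW k f x = some r) (h2 : rootW m f x = some s) : r = s := by
  have h1' := rootW_mono (Nat.le_max_left k m) h1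
  have h2' := rootW_mono (Nat.le_max_right k m) h2
  rw [h1'] at h2'; exact (Option.some.injEq _ _ ▸ h2')

theorem rootW_self {d : PySem.Dict Int Int} {r : Int} {k : Nat}
    (h : d.getD r r = r) (hk : 1 ≤ k) : rootW k d r = some r := by
  cases k with
  | zero => omega
  | succ k => simp [rootW, h]

theorem pres_refl (f : PySem.Dict Int Int) : Pres f f := fun _ _ _ h => h

theorem pres_trans {f d e : PySem.Dict Int Int} (h1 : Pres f d) (h2 : Pres d e) : Pres f e :=
  fun k z s h => h2 k z s (h1 k z s h)

theorem pres_insert {d : PySem.Dict Int Int} {x r : Int} {m : Nat}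
    (hx : rootW m d x = some r) : Pres d (d.insert x r) := by
  intro k z s h
  induction k generalizing z s with
  | zero => simp [rootW] at h
  | succ k ih =>
    by_cases hzx : z = x
    · subst hzx
      have hrs : r = s := rootW_uniq hx h
      subst hrs
      by_cases hrx : r = z
      · subst hrx
        rw [rootW]
        simp [PySem.Dict.getD_insert_self]
      · -- z's root r differs from z, so d.getD z z ≠ z and k ≥ 1
        have hdz : d.getD z z ≠ z := by
          intro hc
          have : rootW (k+1) d z = some z := by simp [rootW, hc]
          exact hrx (rootW_uniq h this)
        have hk1 : 1 ≤ k := by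
          rw [rootW] at h
          simp only [hdz, if_false] at h
          cases k with
          | zero => simp [rootW] at h
          | succ k => omega
        have hfix : d.getD r r = r := rootW_fix hx
        rw [rootW, PySem.Dict.getD_insert_self]
        have hrx' : r ≠ z := hrx
        simp only [hrx', if_false]
        exact rootW_self (by simp [PySem.Dict.getD_insert, hrx']; exact hfix) hk1
    · have hg : (d.insert x r).getD z z = d.getD z z := by simp [PySem.Dict.getD_insert, hzx]
      rw [rootW] at h ⊢
      rw [hg]
      by_cases hp : d.getD z z = z
      · simpa [hp] using h
      · simp only [hp, if_false] at h ⊢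
        exact ih _ _ h

theorem good_of_pres {f d : PySem.Dict Int Int} {k : Nat} (hg : Good f k) (hp : Pres f d) :
    Good d k := fun x => by obtain ⟨r, hr⟩ := hg x; exact ⟨r, hp k x r hr⟩

theorem rootW_eq_of_pres {f d : PySem.Dict Int Int} {k : Nat} (hg : Good f k) (hp : Pres f d)
    (z : Int) : rootW k d z = rootW k f z := by
  obtain ⟨r, hr⟩ := hg z
  rw [hr, hp k z r hr]

theorem findA_spec : ∀ (k : Nat) (f : PySem.Dict Int Int) (x : Int) (fuel : Nat) (r : Int),
    k ≤ fuel → rootW k f x = some r →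
    (pvFindA fuel f x).1 = r ∧ Pres f (pvFindA fuel f x).2 := by
  intro k
  induction k with
  | zero => intro f x fuel r _ h; simp [rootW] at h
  | succ k ih =>
    intro f x fuel r hfuel h
    cases fuel with
    | zero => omega
    | succ fuel =>
      by_cases hc : f.getD x x = x
      · have hr : r = x := by simpa [rootW, hc] using h.symm
        subst hr
        simp [pvFindA, hc]
        exact pres_refl f
      · rw [rootW] at h
        simp only [hc, if_false] at h
        obtain ⟨h1, h2⟩ := ih f (f.getD x x) fuel r (by omega) h
        have hx2 : rootW (k+1) (pvFindA fuel f (f.getD x x)).2 x = some r := by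
          apply h2
          rw [rootW]; simp [hc, h]
        constructor
        · simp [pvFindA, hc, h1]
        · simp only [pvFindA, hc, if_false]
          refine pres_trans h2 ?_
          rw [h1]
          exact pres_insert hx2

theorem rootW_link {d : PySem.Dict Int Int} {ra rb : Int}
    (ha : d.getD ra ra = ra) (hb : d.getD rb rb = rb) :
    ∀ (k : Nat) (z s : Int), rootW k d z = some s →
      rootW (k+1) (d.insert ra rb) z = some (if s = ra then rb else s) := by
  intro k
  induction k with
  | zero => intro z s h; simp [rootW] at h
  | succ k ih =>
    intro z s h
    by_cases hz : z = ra
    · subst hz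
      have hs : s = z := by simpa [rootW, ha] using h.symm
      subst hs
      rw [show k + 1 + 1 = (k + 1) + 1 from rfl, rootW, PySem.Dict.getD_insert_self]
      by_cases hrr : rb = s
      · simp [hrr]
      · simp only [hrr, if_false]
        exact rootW_self (by simp [PySem.Dict.getD_insert, hrr]; exact hb) (by omega)
    · have hg : (d.insert ra rb).getD z z = d.getD z z := by simp [PySem.Dict.getD_insert, hz]
      by_cases hp : d.getD z z = z
      · have hs : s = z := by simpa [rootW, hp] using h.symm
        subst hs
        rw [show k + 1 + 1 = (k + 1) + 1 from rfl, rootW, hg]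
        simp [hp, hz]
      · rw [rootW] at h
        simp only [hp, if_false] at h
        rw [show k + 1 + 1 = (k + 1) + 1 from rfl, rootW, hg]
        simp only [hp, if_false]
        exact ih _ _ h

theorem unionA_spec {fuel k : Nat} {f : PySem.Dict Int Int} {a b ra rb : Int}
    (hk : k ≤ fuel) (hra : rootW k f a = some ra) (hrb : rootW k f b = some rb) :
    ∀ z s, rootW k f z = some s →
      rootW (k+1) (pvUnionA fuel f a b) z = some (if s = ra then rb else s) := by
  intro z s hz
  obtain ⟨ha1, ha2⟩ := findA_spec k f a fuel ra hk hra
  have hb2 : rootW k (pvFindA fuel f a).2 b = some rb := ha2 k b rb hrb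
  obtain ⟨hb1, hb3⟩ := findA_spec k (pvFindA fuel f a).2 b fuel rb hk hb2
  have hpres : Pres f (pvFindA fuel (pvFindA fuel f a).2 b).2 := pres_trans ha2 hb3
  have hfa : (pvFindA fuel (pvFindA fuel f a).2 b).2.getD ra ra = ra :=
    rootW_fix (hpres k a ra hra)
  have hfb : (pvFindA fuel (pvFindA fuel f a).2 b).2.getD rb rb = rb :=
    rootW_fix (hpres k b rb hrb)
  have hz2 := hpres k z s hz
  have := rootW_link hfa hfb k z s hz2
  simpa [pvUnionA, ha1, hb1] using this

-- B side: representative map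
def repB (lab : PySem.Dict Int Int) (x : Int) : Int := lab.getD x x

def InvB (lab : PySem.Dict Int Int) : Prop :=
  lab.keys.Nodup ∧ ∀ x, repB lab (repB lab x) = repB lab x

theorem relabel_get? (la lb : Int) :
    ∀ (l : List (Int × Int)) (d : PySem.Dict Int Int) (z : Int),
    (l.foldl (fun d kv => if kv.2 = la then d.insert kv.1 lb else d) d).get? z =
      if z ∈ (l.filter (fun kv => kv.2 == la)).map Prod.fst then some lb else d.get? z := by
  intro l
  induction l with
  | nil => intro d z; simp
  | cons kv t ih =>
    intro d z
    by_cases hv : kv.2 = la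
    · rw [List.foldl_cons, if_pos hv]
      rw [ih]
      by_cases hm : z ∈ (t.filter (fun kv => kv.2 == la)).map Prod.fst
      · simp [hm, hv]
      · by_cases hzk : z = kv.1
        · simp [hv, hzk]
        · simp [hm, hv, hzk, PySem.Dict.get?_insert]
    · rw [List.foldl_cons, if_neg hv, ih]
      simp [hv]

theorem relabel_nodup (la lb : Int) :
    ∀ (l : List (Int × Int)) (d : PySem.Dict Int Int), d.keys.Nodup →
    (l.foldl (fun d kv => if kv.2 = la then d.insert kv.1 lb else d) d).keys.Nodup := by
  intro l
  induction l with
  | nil => intro d hd; simpa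
  | cons kv t ih =>
    intro d hd
    rw [List.foldl_cons]
    by_cases hv : kv.2 = la
    · rw [if_pos hv]; exact ih _ (PySem.Dict.nodup_keys_insert _ _ _ hd)
    · rw [if_neg hv]; exact ih _ hd

theorem invB_of_formula {lab lab' : PySem.Dict Int Int} {a b : Int} (h : InvB lab)
    (hf : ∀ z, repB lab' z = if repB lab z = repB lab a then repB lab b else repB lab z)
    (hnd : lab'.keys.Nodup) : InvB lab' := by
  refine ⟨hnd, fun x => ?_⟩
  rw [hf x, hf _]
  by_cases hx : repB lab x = repB lab a
  · rw [if_pos hx, h.2 b]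
    simp
  · rw [if_neg hx, h.2 x, if_neg hx]

theorem mergeB_rep {lab : PySem.Dict Int Int} {a b : Int} (h : InvB lab) :
    (∀ z, repB (pvMergeB lab a b) z =
        (if repB lab z = repB lab a then repB lab b else repB lab z)) ∧
    InvB (pvMergeB lab a b) := by
  by_cases hla : lab.getD a a = lab.getD b b
  · have hm : pvMergeB lab a b = lab := by simp [pvMergeB, hla]
    rw [hm]
    refine ⟨fun z => ?_, h⟩
    by_cases hz : repB lab z = repB lab a
    · rw [if_pos hz, hz]; exact (by simpa [repB] using hla)
    · rw [if_neg hz]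
  · have hm : pvMergeB lab a b =
        ((lab.items.foldl (fun d kv => if kv.2 = lab.getD a a then d.insert kv.1 (lab.getD b b) else d) lab).insert
          (lab.getD a a) (lab.getD b b)).insert b (lab.getD b b) := by
      simp [pvMergeB, hla]
    have hget : ∀ z, (lab.items.foldl
        (fun d kv => if kv.2 = lab.getD a a then d.insert kv.1 (lab.getD b b) else d) lab).get? z =
        if lab.get? z = some (lab.getD a a) then some (lab.getD b b) else lab.get? z := by
      intro z
      rw [relabel_get?]
      by_cases hz : z ∈ (lab.items.filter (fun kv => kv.2 == lab.getD a a)).map Prod.fst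
      · rw [if_pos hz]
        obtain ⟨kv, hkv, hzz⟩ := List.mem_map.mp hz
        have hf := List.mem_filter.mp hkv
        have : lab.get? z = some kv.2 := by
          subst hzz
          exact PySem.Dict.get?_of_mem_items _ (by simpa using hf.1) h.1
        rw [if_pos (by rw [this]; simpa using hf.2)]
      · rw [if_neg hz]
        by_cases he : lab.get? z = some (lab.getD a a)
        · exfalso
          apply hz
          refine List.mem_map.mpr ⟨(z, lab.getD a a), List.mem_filter.mpr ⟨?_, by simp⟩, rfl⟩
          exact PySem.Dict.mem_items_of_get?_eq_some _ he
        · rw [if_neg he]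
    have hform : ∀ z, repB (pvMergeB lab a b) z =
        if repB lab z = repB lab a then repB lab b else repB lab z := by
      intro z
      rw [hm]
      simp only [repB, PySem.Dict.getD_insert]
      by_cases hzb : z = b
      · rw [if_pos hzb, hzb]
        simp
      · rw [if_neg hzb]
        by_cases hzla : z = lab.getD a a
        · subst hzla
          rw [if_pos rfl]
          have : repB lab (repB lab a) = repB lab a := h.2 a
          simp only [repB] at this
          rw [if_pos (by simpa [repB] using this)]
        · rw [if_neg hzla]
          rw [PySem.Dict.getD_eq_get?_getD, hget z]
          by_cases he : lab.get? z = some (lab.getD a a)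
          · rw [if_pos he]
            have : lab.getD z z = lab.getD a a := by
              rw [PySem.Dict.getD_eq_get?_getD, he]; rfl
            simp [this]
          · rw [if_neg he]
            have hne : lab.getD z z ≠ lab.getD a a := by
              cases hq : lab.get? z with
              | none =>
                rw [PySem.Dict.getD_eq_get?_getD, hq]
                simpa using hzla
              | some v =>
                rw [PySem.Dict.getD_eq_get?_getD, hq]
                intro hc
                exact he (by rw [hq]; simpa using hc)
            rw [← PySem.Dict.getD_eq_get?_getD]
            simp [hne]
    have hnd : (pvMergeB lab a b).keys.Nodup := by
      rw [hm]
      exact PySem.Dict.nodup_keys_insert _ _ _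
        (PySem.Dict.nodup_keys_insert _ _ _ (relabel_nodup _ _ _ _ h.1))
    exact ⟨hform, invB_of_formula h hform hnd⟩

-- joint invariant of the two edge folds
def InvAB (f lab : PySem.Dict Int Int) (k : Nat) : Prop :=
  Good f k ∧ InvB lab ∧ ∀ x y, (rootW k f x = rootW k f y ↔ repB lab x = repB lab y)

theorem step_inv {fuel k : Nat} {f lab : PySem.Dict Int Int} {c : List Int}
    (h : InvAB f lab k) (hk : k ≤ fuel) : InvAB (pvStepA fuel f c) (pvStepB lab c) (k+1) := by
  obtain ⟨hG, hB, hK⟩ := h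
  obtain ⟨ra, hra⟩ := hG (PySem.List.pyGetD c 0 0)
  obtain ⟨rb, hrb⟩ := hG (PySem.List.pyGetD c 1 0)
  have hU := unionA_spec (a := PySem.List.pyGetD c 0 0) (b := PySem.List.pyGetD c 1 0) hk hra hrb
  have hM := mergeB_rep (a := PySem.List.pyGetD c 0 0) (b := PySem.List.pyGetD c 1 0) hB
  have hker : ∀ x y sx sy, rootW k f x = some sx → rootW k f y = some sy →
      (sx = sy ↔ repB lab x = repB lab y) := by
    intro x y sx sy hx hy
    have := hK x y
    rw [hx, hy] at this
    simpa using this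
  refine ⟨?_, hM.2, ?_⟩
  · intro x
    obtain ⟨sx, hsx⟩ := hG x
    exact ⟨_, hU x sx hsx⟩
  · intro x y
    obtain ⟨sx, hsx⟩ := hG x
    obtain ⟨sy, hsy⟩ := hG y
    rw [show pvStepA fuel f c = pvUnionA fuel f (PySem.List.pyGetD c 0 0) (PySem.List.pyGetD c 1 0) from rfl]
    rw [hU x sx hsx, hU y sy hsy]
    rw [show pvStepB lab c = pvMergeB lab (PySem.List.pyGetD c 0 0) (PySem.List.pyGetD c 1 0) from rfl]
    rw [hM.1 x, hM.1 y]
    have hxa := hker x _ sx ra hsx hra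
    have hya := hker y _ sy ra hsy hra
    have hxb := hker x _ sx rb hsx hrb
    have hyb := hker y _ sy rb hsy hrb
    have hxy := hker x y sx sy hsx hsy
    simp only [Option.some.injEq]
    by_cases h1 : sx = ra <;> by_cases h2 : sy = ra
    · simp [h1, h2, hxa.mp h1, hya.mp h2]
    · rw [if_pos h1, if_neg h2, if_pos (hxa.mp h1), if_neg (fun hc => h2 (hya.mpr hc))]
      constructor
      · intro hc; exact (hyb.mp hc.symm).symm
      · intro hc; exact (hyb.mpr hc.symm).symm
    · rw [if_neg h1, if_pos h2, if_neg (fun hc => h1 (hxa.mpr hc)), if_pos (hya.mp h2)]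
      constructor
      · intro hc; exact hxb.mp hc
      · intro hc; exact hxb.mpr hc
    · rw [if_neg h1, if_neg h2, if_neg (fun hc => h1 (hxa.mpr hc)), if_neg (fun hc => h2 (hya.mpr hc))]
      exact hxy

theorem fold_inv {fuel : Nat} : ∀ (cs : List (List Int)) (f lab : PySem.Dict Int Int) (k : Nat),
    InvAB f lab k → k + cs.length ≤ fuel →
    InvAB (cs.foldl (pvStepA fuel) f) (cs.foldl pvStepB lab) (k + cs.length) := by
  intro cs
  induction cs with
  | nil => intro f lab k h _; simpa using h
  | cons c t ih =>
    intro f lab k h hle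
    have hstep := step_inv (c := c) h (fuel := fuel) (by simp at hle; omega)
    have := ih (pvStepA fuel f c) (pvStepB lab c) (k+1) hstep (by simp at hle ⊢; omega)
    simp only [List.foldl_cons, List.length_cons]
    have heq : k + (t.length + 1) = (k + 1) + t.length := by omega
    rw [heq]
    exact this

theorem count_eq {fuel k : Nat} {lab : PySem.Dict Int Int} (hk : k ≤ fuel) :
    ∀ (l : List Int) (f : PySem.Dict Int Int) (SA SB : PySem.Set Int),
    Good f k → (∀ x y, (rootW k f x = rootW k f y ↔ repB lab x = repB lab y)) →
    SA.length = SB.length →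
    (∀ x s, rootW k f x = some s → (s ∈ SA ↔ repB lab x ∈ SB)) →
    (l.foldl (pvStepCountA fuel) (f, SA)).2.length =
      (l.foldl (fun (g : PySem.Set Int) i => PySem.Set.add g (repB lab i)) SB).length := by
  intro l
  induction l with
  | nil => intro f SA SB _ _ hlen _; simpa using hlen
  | cons i t ih =>
    intro f SA SB hG hK hlen hmem
    obtain ⟨si, hsi⟩ := hG i
    obtain ⟨hf1, hf2⟩ := findA_spec k f i fuel si hk hsi
    have hG' : Good (pvFindA fuel f i).2 k := good_of_pres hG hf2
    have hroot : ∀ z, rootW k (pvFindA fuel f i).2 z = rootW k f z := rootW_eq_of_pres hG hf2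
    have hstep : pvStepCountA fuel (f, SA) i =
        ((pvFindA fuel f i).2, PySem.Set.add SA si) := by
      simp [pvStepCountA, hf1]
    rw [List.foldl_cons, List.foldl_cons, hstep]
    apply ih
    · exact hG'
    · intro x y; rw [hroot, hroot]; exact hK x y
    · have hiff := hmem i si hsi
      by_cases hm : si ∈ SA
      · rw [PySem.Set.add_of_mem hm, PySem.Set.add_of_mem (hiff.mp hm), hlen]
      · rw [PySem.Set.add_of_not_mem hm, PySem.Set.add_of_not_mem (fun hc => hm (hiff.mpr hc))]
        simp [hlen]
    · intro x s hx
      rw [hroot] at hx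
      rw [PySem.Set.mem_add, PySem.Set.mem_add]
      have h1 := hmem x s hx
      have h2 : s = si ↔ repB lab x = repB lab i := by
        have := hK x i
        rw [hx, hsi] at this
        simpa using this
      rw [h1, h2]

-- ===== VERDICT (by name: the statement is the Claim_ definition above) =====
theorem makeConnected_spec : Claim_equal_makeConnected := by
  intro n cs _ _
  unfold Spec_makeConnected
  simp only [makeConnected, makeConnected_alt]
  have hInv0 : InvAB PySem.Dict.empty PySem.Dict.empty 1 := by
    refine ⟨fun x => ⟨x, by simp [rootW, PySem.Dict.getD_empty]⟩,
      ⟨PySem.Dict.nodup_keys_empty, fun x => by simp [repB, PySem.Dict.getD_empty]⟩,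
      fun x y => by simp [rootW, repB, PySem.Dict.getD_empty]⟩
  have hInv := fold_inv (fuel := 2 * cs.length + 2) cs PySem.Dict.empty PySem.Dict.empty 1 hInv0 (by omega)
  obtain ⟨hG, hB, hK⟩ := hInv
  have hcnt := count_eq (fuel := 2 * cs.length + 2) (lab := cs.foldl pvStepB PySem.Dict.empty)
      (k := 1 + cs.length) (by omega) (PySem.List.pyRange 0 n 1)
      (cs.foldl (pvStepA (2 * cs.length + 2)) PySem.Dict.empty) PySem.Set.empty PySem.Set.empty
      hG hK rfl (by intro x s _; simp [PySem.Set.empty])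
  simp only [repB] at hcnt
  rw [hcnt]
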